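-- pv_equiv track=rewrite | github.com/yanglinkevin/pythonAutumnExam | pyCode/tencent.py | helper
-- ===== SOURCE A (Python) =====
-- def helper(num):
--     if num<=18:
--         return num
--     a = num//2
--     str_a = str(a)
--     while a>0 and str_a[-1]!='9':
--         a -= 1
--         str_a = str(a)
--     b = num - a
--     res = 0
--     for i in str(b):
--         res += int(i)
--     for i in str(a):
--         res += int(i)
--     return res
-- ===== SOURCE B (Python) =====
-- def _digit_sum(n):
--     s = 0
--     while n > 0:
--         s += n % 10
--         n //= 10
--     return s
--
-- def helper(num):
--     if num <= 18:
--         return num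
--     a = num // 2
--     if a % 10 != 9:
--         a = a // 10 * 10 - 1  # largest value <= num//2 ending in 9 (a >= 9 here, so no underflow)
--     b = num - a
--     return _digit_sum(b) + _digit_sum(a)
-- ===== Notes on version B (the rewrite author's own statement) =====
-- stated objective: faster
-- what changed: Replaces the unit-step decrement loop (which rebuilds str(a) every iteration) by the closed form a//10*10-1 for the largest value ending in 9, and computes both digit sums arithmetically with %10 and //10 instead of iterating over string representations.
import Mathlib
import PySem

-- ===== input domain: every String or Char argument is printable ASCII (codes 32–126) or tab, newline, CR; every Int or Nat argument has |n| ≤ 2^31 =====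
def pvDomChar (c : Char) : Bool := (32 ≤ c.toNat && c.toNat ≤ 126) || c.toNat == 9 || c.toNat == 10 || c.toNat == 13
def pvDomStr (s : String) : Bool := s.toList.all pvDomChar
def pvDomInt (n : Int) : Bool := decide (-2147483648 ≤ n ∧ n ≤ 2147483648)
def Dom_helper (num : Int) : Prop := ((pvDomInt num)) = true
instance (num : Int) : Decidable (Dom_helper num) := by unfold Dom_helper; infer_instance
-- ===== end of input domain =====

-- B replaces A's unit-step decrement loop by the closed form a//10*10-1 and sums digits
-- arithmetically (%10, //10) instead of over string representations.

-- ===== PORT A =====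
-- A's `while a>0 and str_a[-1]!='9': a -= 1` (str_a is recomputed as str(a) each iteration).
-- str(a) is never empty, so the `str_a[-1]` lookup is `≠ some '9'` on the Option.
def helperLoop (a : Int) : Int :=
  if h : 0 < a ∧ PySem.Str.pyGet? (PySem.Int.toStr a) (-1) ≠ some '9' then
    helperLoop (a - 1)
  else a
termination_by a.toNat
decreasing_by omega

-- A's `res += int(i)` on a character of str(n): int(i) via PySem.Int.ofChars? [i];
-- i is always a decimal digit here, so ofChars? is `some` and getD 0 is exact.
def helperResLoop (s : String) (res : Int) : Int :=
  s.toList.foldl (fun r c => r + (PySem.Int.ofChars? [c]).getD 0) res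

def helper (num : Int) : Int :=
  if num ≤ 18 then num
  else
    let a := helperLoop (PySem.Int.floordiv num 2)
    let b := num - a
    let res := helperResLoop (PySem.Int.toStr b) 0
    helperResLoop (PySem.Int.toStr a) res

-- ===== PORT B =====
def digitSum (n : Int) : Int :=
  if h : 0 < n then PySem.Int.mod n 10 + digitSum (PySem.Int.floordiv n 10) else 0
termination_by n.toNat
decreasing_by
  rw [PySem.Int.floordiv_eq_ediv_of_pos (by omega : (0:Int) < 10)]
  omega

def helper_alt (num : Int) : Int :=
  if num ≤ 18 then num
  else
    let a0 := PySem.Int.floordiv num 2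
    let a := if PySem.Int.mod a0 10 ≠ 9 then
               PySem.Int.floordiv a0 10 * 10 - 1 else a0
    let b := num - a
    digitSum b + digitSum a

-- ===== PRECONDITION & SPEC =====
def Spec_helper (num : Int) (out : Int) : Prop := out = helper_alt num
instance (num : Int) (out : Int) : Decidable (Spec_helper num out) := by unfold Spec_helper; infer_instance

-- ===== CLAIM (what is proved, stated in full; the proofs are below) =====
def Claim_equal_helper : Prop := ∀ (num : Int), Dom_helper num → Spec_helper num (helper num)

-- ===== LEMMAS AND PROOFS =====

-- str(n) for 0 ≤ n is Nat.toDigits 10 n.toNat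
theorem toChars_of_nonneg (n : Int) (h : 0 ≤ n) :
    PySem.Int.toChars n = Nat.toDigits 10 n.toNat := by
  simp [PySem.Int.toChars, not_lt.mpr h]

-- s[-1] on a nonempty char list picks the last element
theorem pyGet_concat_neg_one (l : List Char) (c : Char) :
    PySem.Chars.pyGet? (l ++ [c]) (-1) = some c := by
  simp [PySem.Chars.pyGet?, PySem.List.pyGet?, PySem.List.pyIdx?]

-- the last character of str(n) for 0 ≤ n is the digit character of n % 10
theorem last_char_toStr (n : Int) (h : 0 ≤ n) :
    PySem.Str.pyGet? (PySem.Int.toStr n) (-1) = some (Nat.digitChar (n.toNat % 10)) := by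
  rw [PySem.Str.pyGet?, PySem.Int.toList_toStr, toChars_of_nonneg n h]
  rw [Nat.toDigits_eq_if (by norm_num)]
  by_cases hm : n.toNat < 10
  · rw [if_pos hm, Nat.mod_eq_of_lt hm]
    exact pyGet_concat_neg_one [] _
  · rw [if_neg hm]
    exact pyGet_concat_neg_one _ _

-- digitChar is '9' exactly on 9 (for digits)
theorem digitChar_eq_nine (d : Nat) (hd : d < 10) : Nat.digitChar d = '9' ↔ d = 9 := by
  interval_cases d <;> decide

-- closed form of A's decrement loop, for a ≥ 9
theorem helperLoop_eq (a : Int) (h : 9 ≤ a) :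
    helperLoop a = if PySem.Int.mod a 10 ≠ 9 then
        PySem.Int.floordiv a 10 * 10 - 1 else a := by
  induction a, h using Int.le_induction with
  | base =>
    rw [helperLoop]
    rw [dif_neg (by
      rw [last_char_toStr 9 (by omega)]
      decide)]
    rw [if_neg (by decide : ¬(PySem.Int.mod 9 10 ≠ 9))]
  | succ n hn ih =>
    have h10 : (0:Int) < 10 := by omega
    have hmod : PySem.Int.mod (n + 1) 10 = (n + 1) % 10 := PySem.Int.mod_eq_emod_of_pos h10
    have hdiv : PySem.Int.floordiv (n + 1) 10 = (n + 1) / 10 := PySem.Int.floordiv_eq_ediv_of_pos h10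
    have htn : (n + 1).toNat % 10 = ((n + 1) % 10).toNat := by omega
    rw [helperLoop]
    by_cases h9 : (n + 1) % 10 = 9
    · rw [dif_neg (by
        rw [last_char_toStr (n + 1) (by omega), htn, h9,
          (by decide : ((9:Int).toNat.digitChar) = '9')]
        simp)]
      rw [if_neg (show ¬(PySem.Int.mod (n + 1) 10 ≠ 9) by rw [hmod]; omega)]
    · have hne : Nat.digitChar ((n + 1).toNat % 10) ≠ '9' := by
        rw [Ne, digitChar_eq_nine _ (Nat.mod_lt _ (by omega))]
        omega
      rw [dif_pos (show 0 < n + 1 ∧ PySem.Str.pyGet? (PySem.Int.toStr (n + 1)) (-1) ≠ some '9' from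
        ⟨by omega, by rw [last_char_toStr (n + 1) (by omega)]; simp [hne]⟩)]
      have hsub : n + 1 - 1 = n := by omega
      rw [hsub, ih]
      have hmn : PySem.Int.mod n 10 = n % 10 := PySem.Int.mod_eq_emod_of_pos h10
      have hdn : PySem.Int.floordiv n 10 = n / 10 := PySem.Int.floordiv_eq_ediv_of_pos h10
      rw [hmn, hdn, hmod, hdiv]
      by_cases hn9 : n % 10 = 9
      · rw [if_neg (by omega), if_pos (by omega)]
        omega
      · rw [if_pos (by omega), if_pos (by omega)]
        omega

-- int(c) for a decimal digit character, as A computes it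
theorem digitVal_digitChar (d : Nat) (hd : d < 10) :
    (PySem.Int.ofChars? [Nat.digitChar d]).getD 0 = (d : Int) := by
  interval_cases d <;> decide

theorem digitSum_lt_ten (m : Nat) (hm : m < 10) : digitSum (m : Int) = (m : Int) := by
  by_cases h0 : 0 < m
  · rw [digitSum, dif_pos (by exact_mod_cast h0)]
    have : PySem.Int.floordiv (m : Int) 10 = 0 := by
      rw [PySem.Int.floordiv_eq_ediv_of_pos (by omega)]; omega
    rw [this, digitSum, dif_neg (by omega), PySem.Int.mod_eq_emod_of_pos (by omega)]
    omega
  · have : m = 0 := by omega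
    subst this
    rw [digitSum]; norm_num

theorem resLoop_nat (m : Nat) : ∀ res : Int,
    (Nat.toDigits 10 m).foldl (fun r c => r + (PySem.Int.ofChars? [c]).getD 0) res
      = res + digitSum (m : Int) := by
  induction m using Nat.strong_induction_on with
  | _ m ih =>
    intro res
    rw [Nat.toDigits_eq_if (by norm_num)]
    by_cases hm : m < 10
    · rw [if_pos hm]
      simp only [List.foldl_cons, List.foldl_nil]
      rw [digitVal_digitChar m hm, digitSum_lt_ten m hm]
    · rw [if_neg hm, List.foldl_append]
      rw [ih (m / 10) (Nat.div_lt_self (by omega) (by omega))]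
      simp only [List.foldl_cons, List.foldl_nil]
      rw [digitVal_digitChar _ (Nat.mod_lt _ (by omega))]
      have hpos : (0:Int) < (m:Int) := by exact_mod_cast (by omega : 0 < m)
      conv_rhs => rw [digitSum]
      rw [dif_pos hpos]
      rw [PySem.Int.mod_eq_emod_of_pos (by omega), PySem.Int.floordiv_eq_ediv_of_pos (by omega)]
      have h1 : ((m : Int)) % 10 = ((m % 10 : Nat) : Int) := by push_cast; ring
      have h2 : ((m : Int)) / 10 = ((m / 10 : Nat) : Int) := by push_cast; ring
      rw [h1, h2]
      ring

-- A's string digit sum equals B's arithmetic digit sum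
theorem resLoop_eq (n : Int) (h : 0 ≤ n) (res : Int) :
    helperResLoop (PySem.Int.toStr n) res = res + digitSum n := by
  rw [helperResLoop, PySem.Int.toList_toStr, toChars_of_nonneg n h, resLoop_nat n.toNat res,
    Int.toNat_of_nonneg h]

-- ===== VERDICT (by name: the statement is the Claim_ definition above) =====
theorem helper_spec : Claim_equal_helper := by
  intro num _
  unfold Spec_helper helper helper_alt
  by_cases h : num ≤ 18
  · simp [h]
  · simp only [if_neg h]
    have h10 : (0:Int) < 10 := by omega
    have hdiv2 : PySem.Int.floordiv num 2 = num / 2 := PySem.Int.floordiv_eq_ediv_of_pos (by omega)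
    have ha0 : (9:Int) ≤ PySem.Int.floordiv num 2 := by rw [hdiv2]; omega
    rw [helperLoop_eq _ ha0]
    set a0 := PySem.Int.floordiv num 2 with ha0def
    set a : Int := if PySem.Int.mod a0 10 ≠ 9 then PySem.Int.floordiv a0 10 * 10 - 1 else a0 with hadef
    have hmod : PySem.Int.mod a0 10 = a0 % 10 := PySem.Int.mod_eq_emod_of_pos h10
    have hdivA : PySem.Int.floordiv a0 10 = a0 / 10 := PySem.Int.floordiv_eq_ediv_of_pos h10
    have hale : 9 ≤ a ∧ a ≤ a0 := by
      rw [hadef, hmod, hdivA]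
      by_cases h9 : a0 % 10 = 9
      · rw [if_neg (by omega)]; omega
      · rw [if_pos (by omega)]
        constructor <;> omega
    have hb : 0 ≤ num - a := by
      have : a0 ≤ num := by rw [hdiv2]; omega
      omega
    rw [resLoop_eq (num - a) hb 0, resLoop_eq a (by omega) _]
    ring
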